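-- pv_equiv track=rewrite | github.com/teaampee/Conceal-secret-message-using-DNA-algorithm | graduation project/playfair_cipher.py | remove_non_alphabetic_characters
-- ===== SOURCE A (Python) =====
-- def remove_non_alphabetic_characters(string):
--     alphabits=["a","b","c","d","e","f","g","h","i","k","l","m","n","o","p","q","r","s","t","u","v","w","x","y","z"]
--     alphabetic_string = ""
--     for char in string:
--           for element in alphabits:
--             if char == element:
--                 alphabetic_string += char
--     return alphabetic_string
-- ===== SOURCE B (Python) =====
-- def remove_non_alphabetic_characters(string):
--     keep = set("abcdefghiklmnopqrstuvwxyz")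
--     delete = set(string) - keep
--     return string.translate({ord(c): None for c in delete})
-- ===== Notes on version B (the rewrite author's own statement) =====
-- stated objective: faster
-- what changed: Instead of scanning a 25-letter table per character with repeated string concatenation, B precomputes the set of characters to delete (distinct input characters minus the kept alphabet, via set difference) and deletes them in one str.translate pass.
import Mathlib
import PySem

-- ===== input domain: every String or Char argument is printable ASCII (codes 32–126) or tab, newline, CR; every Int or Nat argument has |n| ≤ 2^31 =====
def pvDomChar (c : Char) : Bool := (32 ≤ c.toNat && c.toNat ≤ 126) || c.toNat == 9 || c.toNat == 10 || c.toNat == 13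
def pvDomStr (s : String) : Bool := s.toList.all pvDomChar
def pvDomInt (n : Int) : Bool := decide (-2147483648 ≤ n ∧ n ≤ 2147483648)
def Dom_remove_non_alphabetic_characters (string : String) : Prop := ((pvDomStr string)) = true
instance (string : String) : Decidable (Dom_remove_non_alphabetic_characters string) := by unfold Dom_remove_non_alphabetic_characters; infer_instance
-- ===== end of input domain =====

-- B replaces the per-character table scan by computing the delete-set (distinct input chars minus the kept alphabet) and one translate pass; objective: idiomatic, return value identical.


-- ===== PORT A =====
def pvAlphabits : List Char :=
  ['a','b','c','d','e','f','g','h','i','k','l','m','n','o','p','q','r','s','t','u','v','w','x','y','z']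

def remove_non_alphabetic_characters (string : String) : String :=
  String.mk <| string.toList.foldl
    (fun acc char =>
      pvAlphabits.foldl (fun a element => if char = element then a ++ [char] else a) acc)
    []

-- ===== PORT B =====
-- keep = set("abcdefghiklmnopqrstuvwxyz")
def pvKeep : PySem.Set Char := PySem.Set.ofList "abcdefghiklmnopqrstuvwxyz".toList

-- delete = set(string) - keep; string.translate({ord(c): None for c in delete})
-- (translate with an all-None table deletes exactly the characters whose code is a key,
--  i.e. the members of 'delete' — a membership-only use of the set, exact per PySem)
def remove_non_alphabetic_characters_alt (string : String) : String :=
  let delete : PySem.Set Char := PySem.Set.diff (PySem.Set.ofList string.toList) pvKeep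
  String.mk (string.toList.filter (fun c => !(PySem.Set.contains delete c)))

-- ===== PRECONDITION & SPEC =====
def Spec_remove_non_alphabetic_characters (string : String) (out : String) : Prop := out = remove_non_alphabetic_characters_alt string
instance (string : String) (out : String) : Decidable (Spec_remove_non_alphabetic_characters string out) := by unfold Spec_remove_non_alphabetic_characters; infer_instance

-- ===== CLAIM (what is proved, stated in full; the proofs are below) =====
def Claim_equal_remove_non_alphabetic_characters : Prop := ∀ (string : String), Dom_remove_non_alphabetic_characters string → Spec_remove_non_alphabetic_characters string (remove_non_alphabetic_characters string)

-- ===== LEMMAS AND PROOFS =====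

-- A's inner loop over the alphabet list appends the char exactly when it is in the list.
theorem pv_inner_loop (c : Char) (acc : List Char) :
    pvAlphabits.foldl (fun a element => if c = element then a ++ [c] else a) acc
      = acc ++ (if c ∈ pvAlphabits then [c] else []) := by
  by_cases h : c ∈ pvAlphabits
  · rw [if_pos h]
    fin_cases h <;> simp [pvAlphabits, List.foldl]
  · rw [if_neg h, List.append_nil]
    have gen : ∀ (l : List Char), (∀ e ∈ l, c ≠ e) → ∀ acc : List Char,
        l.foldl (fun a element => if c = element then a ++ [c] else a) acc = acc := by
      intro l
      induction l with
      | nil => intro _ _; rfl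
      | cons e t iht =>
        intro hl acc
        rw [List.foldl_cons, if_neg (hl e (by simp))]
        exact iht (fun x hx => hl x (by simp [hx])) acc
    exact gen pvAlphabits (fun e he hce => h (hce ▸ he)) acc

-- A's outer loop is a filter by membership in the alphabet list.
theorem pv_outer_loop (l acc : List Char) :
    l.foldl (fun acc char =>
        pvAlphabits.foldl (fun a element => if char = element then a ++ [char] else a) acc) acc
      = acc ++ l.filter (fun c => decide (c ∈ pvAlphabits)) := by
  induction l generalizing acc with
  | nil => simp
  | cons c t ih =>
    rw [List.foldl_cons, pv_inner_loop, ih, List.filter_cons]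
    by_cases h : c ∈ pvAlphabits <;> simp [h]

-- On characters of the input, membership in B's delete-set is the negation of alphabet membership.
theorem pv_delete_char (l : List Char) (c : Char) (hc : c ∈ l) :
    (!(PySem.Set.contains (PySem.Set.diff (PySem.Set.ofList l) pvKeep) c))
      = decide (c ∈ pvAlphabits) := by
  have hlist : "abcdefghiklmnopqrstuvwxyz".toList = pvAlphabits := by decide
  have hkeep : c ∈ pvKeep ↔ c ∈ pvAlphabits := by
    rw [pvKeep, PySem.Set.mem_ofList, hlist]
  by_cases h : c ∈ pvAlphabits
  · have : ¬ c ∈ PySem.Set.diff (PySem.Set.ofList l) pvKeep := by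
      rw [PySem.Set.mem_diff]
      exact fun ⟨_, hk⟩ => hk (hkeep.mpr h)
    simp [this, h]
  · have : c ∈ PySem.Set.diff (PySem.Set.ofList l) pvKeep := by
      rw [PySem.Set.mem_diff, PySem.Set.mem_ofList]
      exact ⟨hc, fun hk => h (hkeep.mp hk)⟩
    simp [this, h]

-- ===== VERDICT (by name: the statement is the Claim_ definition above) =====
theorem remove_non_alphabetic_characters_spec : Claim_equal_remove_non_alphabetic_characters := by
  intro s _
  unfold Spec_remove_non_alphabetic_characters remove_non_alphabetic_characters
    remove_non_alphabetic_characters_alt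
  simp only [pv_outer_loop, List.nil_append]
  congr 1
  exact (List.filter_congr (fun c hc => pv_delete_char s.toList c hc)).symm
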